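-- pv_equiv track=rewrite | github.com/declare-lab/KAIROS | src/MAS/rewards.py | has_non_consecutive_turn
-- ===== SOURCE A (Python) =====
-- def has_non_consecutive_turn(groups, sequence):
--     # Build map from item to group index
--     item_to_group = {}
--     for i, group in enumerate(groups):
--         for item in group:
--             item_to_group[item] = i
--
--     # Get group sequence from item sequence
--     group_sequence = [item_to_group[item] for item in sequence if item in item_to_group]
--
--     seen = {}
--     for i, g in enumerate(group_sequence):
--         if g not in seen:
--             seen[g] = i
--         else:
--             # Check if any different group appeared in between
--             if any(group_sequence[j] != g for j in range(seen[g] + 1, i)):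
--                 return True
--     return False
-- ===== SOURCE B (Python) =====
-- def has_non_consecutive_turn(groups, sequence):
--     item_to_group = {}
--     for i, group in enumerate(groups):
--         for item in group:
--             item_to_group[item] = i
--     # Single pass: a group flagged iff it starts a second run of the group
--     # sequence, i.e. appears again after a different group has intervened.
--     seen_runs = set()
--     prev = None
--     for item in sequence:
--         if item not in item_to_group:
--             continue
--         g = item_to_group[item]
--         if prev is None or g != prev:
--             if g in seen_runs:
--                 return True
--             seen_runs.add(g)
--             prev = g
--     return False
-- ===== Notes on version B (the rewrite author's own statement) =====
-- stated objective: faster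
-- what changed: Instead of materialising the group sequence and, for each repeated group, rescanning the segment back to its first occurrence (quadratic), B makes one pass that compresses the mapped sequence into consecutive runs and reports true iff some group starts a second run.
import Mathlib
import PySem

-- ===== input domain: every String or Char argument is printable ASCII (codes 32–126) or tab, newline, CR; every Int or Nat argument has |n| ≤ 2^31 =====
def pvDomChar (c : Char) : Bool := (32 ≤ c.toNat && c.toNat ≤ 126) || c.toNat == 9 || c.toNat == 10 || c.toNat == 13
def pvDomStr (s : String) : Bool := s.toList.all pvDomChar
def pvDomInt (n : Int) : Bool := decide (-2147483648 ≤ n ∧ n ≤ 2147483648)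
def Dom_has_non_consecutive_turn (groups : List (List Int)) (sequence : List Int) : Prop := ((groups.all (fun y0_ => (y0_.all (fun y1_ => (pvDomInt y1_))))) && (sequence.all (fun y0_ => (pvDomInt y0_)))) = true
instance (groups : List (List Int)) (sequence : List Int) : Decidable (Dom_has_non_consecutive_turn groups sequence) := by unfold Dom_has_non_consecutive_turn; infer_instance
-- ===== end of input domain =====

-- B is a single linear pass compressing the mapped sequence into consecutive runs,
-- instead of A's per-repeat back-scan (objective: faster, asymptotic O(n^2) → O(n)).

-- ===== PORT A =====
-- shared helper: the identical first loop of both Pythons ('item_to_group' map)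
def pvItemToGroup (groups : List (List Int)) : PySem.Dict Int Int :=
  (PySem.List.enumerate groups 0).foldl
    (fun d p => p.2.foldl (fun d item => d.insert item p.1) d) PySem.Dict.empty

-- the comprehension '[item_to_group[item] for item in sequence if item in item_to_group]'
def pvGroupSeq (d : PySem.Dict Int Int) (sequence : List Int) : List Int :=
  sequence.foldl (fun acc item =>
    match d.get? item with
    | some g => acc ++ [g]
    | none => acc) []

-- the 'for i, g in enumerate(group_sequence)' loop with early return;
-- 'group_sequence[j]' is exact here: every j in range(seen[g]+1, i) is a valid index
def pvLoopA (gs : List Int) : Int → List Int → PySem.Dict Int Int → Bool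
  | _, [], _ => false
  | i, g :: rest, seen =>
    match seen.get? g with
    | none => pvLoopA gs (i + 1) rest (seen.insert g i)
    | some f =>
      if (PySem.List.pyRange (f + 1) i 1).any (fun j => PySem.List.pyGet? gs j != some g)
      then true
      else pvLoopA gs (i + 1) rest seen

def has_non_consecutive_turn (groups : List (List Int)) (sequence : List Int) : Bool :=
  let d := pvItemToGroup groups
  let gs := pvGroupSeq d sequence
  pvLoopA gs 0 gs PySem.Dict.empty

-- ===== PORT B =====
-- the single 'for item in sequence' loop of B: skip unmapped items, detect run starts
def pvLoopB (d : PySem.Dict Int Int) : List Int → PySem.Set Int → Option Int → Bool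
  | [], _, _ => false
  | item :: rest, seenRuns, prev =>
    match d.get? item with
    | none => pvLoopB d rest seenRuns prev
    | some g =>
      if prev.isNone || (some g != prev) then
        if PySem.Set.contains seenRuns g then true
        else pvLoopB d rest (PySem.Set.add seenRuns g) (some g)
      else pvLoopB d rest seenRuns prev

def has_non_consecutive_turn_alt (groups : List (List Int)) (sequence : List Int) : Bool :=
  pvLoopB (pvItemToGroup groups) sequence PySem.Set.empty none

-- ===== PRECONDITION & SPEC =====
def Spec_has_non_consecutive_turn (groups : List (List Int)) (sequence : List Int) (out : Bool) : Prop := out = has_non_consecutive_turn_alt groups sequence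
instance (groups : List (List Int)) (sequence : List Int) (out : Bool) : Decidable (Spec_has_non_consecutive_turn groups sequence out) := by unfold Spec_has_non_consecutive_turn; infer_instance

-- ===== CLAIM (what is proved, stated in full; the proofs are below) =====
def Claim_equal_has_non_consecutive_turn : Prop := ∀ (groups : List (List Int)) (sequence : List Int), Dom_has_non_consecutive_turn groups sequence → Spec_has_non_consecutive_turn groups sequence (has_non_consecutive_turn groups sequence)

-- ===== LEMMAS AND PROOFS =====

-- proof-side reformulation of B's loop over the already-mapped group sequence
def pvRunScan : List Int → PySem.Set Int → Option Int → Bool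
  | [], _, _ => false
  | g :: rest, s, prev =>
    if prev.isNone || (some g != prev) then
      if PySem.Set.contains s g then true
      else pvRunScan rest (PySem.Set.add s g) (some g)
    else pvRunScan rest s prev

lemma pvLoopB_eq_runScan (d : PySem.Dict Int Int) (seq : List Int)
    (s : PySem.Set Int) (prev : Option Int) :
    pvLoopB d seq s prev = pvRunScan (seq.filterMap d.get?) s prev := by
  induction seq generalizing s prev with
  | nil => rfl
  | cons item rest ih =>
    simp only [pvLoopB, List.filterMap_cons]
    cases h : d.get? item with
    | none => simpa using ih s prev
    | some g =>
      simp only [pvRunScan]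
      split_ifs with h1 h2 <;> simp_all

lemma pvGroupSeq_eq_filterMap (d : PySem.Dict Int Int) (seq : List Int) :
    pvGroupSeq d seq = seq.filterMap d.get? := by
  suffices h : ∀ acc, seq.foldl (fun acc item =>
      match d.get? item with
      | some g => acc ++ [g]
      | none => acc) acc = acc ++ seq.filterMap d.get? by
    simpa using h []
  induction seq with
  | nil => simp
  | cons item rest ih =>
    intro acc
    cases h : d.get? item <;> simp [h, ih]

-- 'p has no split group': between two equal entries, everything is equal
def pvNoSplit (p : List Int) : Prop :=
  ∀ i j k : Nat, i ≤ j → j ≤ k → k < p.length →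
    p.getD i 0 = p.getD k 0 → p.getD j 0 = p.getD k 0

lemma pvNoSplit_nil : pvNoSplit [] := by
  intro i j k _ _ hk
  simp at hk

lemma pvGetD_append_left {p rest : List Int} {m : Nat} (hm : m < p.length) :
    (p ++ rest).getD m 0 = p.getD m 0 := by
  rw [List.getD_eq_getElem _ 0 (by simp; omega), List.getD_eq_getElem p 0 hm]
  simp [List.getElem_append_left hm]

lemma pvGetD_mem {p : List Int} {m : Nat} (hm : m < p.length) : p.getD m 0 ∈ p := by
  rw [List.getD_eq_getElem p 0 hm]; exact List.getElem_mem _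

lemma pvGetD_append_self {p rest : List Int} {g : Int} :
    (p ++ g :: rest).getD p.length 0 = g := by
  rw [List.getD_eq_getElem _ 0 (by simp)]
  simp

-- NoSplit is preserved by appending g when (g ∉ p) or (p ends with g)
lemma pvNoSplit_append {p : List Int} {g : Int} (hns : pvNoSplit p)
    (h : g ∉ p ∨ p.getD (p.length - 1) 0 = g) : pvNoSplit (p ++ [g]) := by
  intro i j k hij hjk hk hik
  have hlen' : (p ++ [g]).length = p.length + 1 := by simp
  by_cases hkp : k < p.length
  · rw [pvGetD_append_left hkp] at hik ⊢
    rw [pvGetD_append_left (show i < p.length by omega)] at hik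
    rw [pvGetD_append_left (show j < p.length by omega)]
    exact hns i j k hij hjk hkp hik
  · have hk' : k = p.length := by omega
    subst hk'
    have hgd : (p ++ [g]).getD p.length 0 = g := pvGetD_append_self
    rw [hgd] at hik ⊢
    by_cases hjp : j < p.length
    · have hip : i < p.length := by omega
      rcases h with hgp | hlastg
      · exfalso
        rw [pvGetD_append_left hip] at hik
        exact hgp (hik ▸ pvGetD_mem hip)
      · rw [pvGetD_append_left hip] at hik
        rw [pvGetD_append_left hjp]
        have hl1 : p.length - 1 < p.length := by omega
        have := hns i j (p.length - 1) (by omega) (by omega) hl1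
          (by rw [hlastg, hik])
        rw [hlastg] at this
        exact this
    · have : j = p.length := by omega
      subst this
      exact hgd

lemma pvIndex?_append_singleton_of_mem {p : List Int} {g : Int} (hg : g ∈ p) :
    ∀ g', PySem.List.index? (p ++ [g]) g' = PySem.List.index? p g' := by
  intro g'
  by_cases h : g' ∈ p
  · exact PySem.List.index?_append_of_mem [g] h
  · have h1 : PySem.List.index? p g' = none := (PySem.List.index?_eq_none_iff _ _).mpr h
    have h2 : PySem.List.index? (p ++ [g]) g' = none := by
      rw [PySem.List.index?_eq_none_iff]
      simp only [List.mem_append, List.mem_singleton]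
      rintro (hc | rfl)
      · exact h hc
      · exact h hg
    rw [h1, h2]

lemma pvIndex?_facts {p : List Int} {g : Int} {fn : Nat}
    (h : PySem.List.index? p g = some fn) :
    fn < p.length ∧ p.getD fn 0 = g := by
  obtain ⟨hk, hval, _⟩ := PySem.List.getElem_of_index?_eq_some h
  exact ⟨hk, by rw [List.getD_eq_getElem p 0 hk]; exact hval⟩

-- the central induction: A's back-scanning loop equals the run scan,
-- given the invariants over the processed prefix p
lemma pvLoopA_eq_runScan (rest : List Int) :
    ∀ (p : List Int) (seen : PySem.Dict Int Int) (s : PySem.Set Int),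
    (∀ g, seen.get? g = Option.map Int.ofNat (PySem.List.index? p g)) →
    (∀ g, g ∈ s ↔ g ∈ p) →
    pvNoSplit p →
    pvLoopA (p ++ rest) (p.length : Int) rest seen = pvRunScan rest s p.getLast? := by
  induction rest with
  | nil => intro p seen s _ _ _; rfl
  | cons g rest ih =>
    intro p seen s hseen hs hns
    simp only [pvLoopA, pvRunScan]
    rw [hseen g]
    cases hidx : PySem.List.index? p g with
    | none =>
      -- g not seen before: both sides start a new run
      have hgp : g ∉ p := (PySem.List.index?_eq_none_iff _ _).mp hidx
      have hcond : (p.getLast?.isNone || (some g != p.getLast?)) = true := by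
        cases hl : p.getLast? with
        | none => simp
        | some last =>
          have hlm : last ∈ p := by
            have := List.getLast?_eq_getElem? (l := p)
            rw [hl] at this
            exact List.mem_of_getElem? this.symm
          have : g ≠ last := fun h => hgp (h ▸ hlm)
          simp [this]
      have hcont : PySem.Set.contains s g = false := by
        by_contra hc
        have : PySem.Set.contains s g = true := by
          revert hc; cases PySem.Set.contains s g <;> simp
        exact hgp ((hs g).mp ((PySem.Set.contains_iff _ _).mp this))
      rw [hcond, hcont]
      simp only [Option.map_none, if_true, if_false, Bool.false_eq_true]
      have hrw : p ++ g :: rest = (p ++ [g]) ++ rest := by simp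
      have hlen : (p.length : Int) + 1 = ((p ++ [g]).length : Int) := by
        simp
      rw [hrw, hlen, ih (p ++ [g]) (seen.insert g (p.length : Int)) (PySem.Set.add s g)
        ?_ ?_ ?_, List.getLast?_concat]
      · intro g'
        by_cases hgg : g' = g
        · subst hgg
          rw [PySem.Dict.get?_insert_self, PySem.List.index?_append_singleton_self _ _ hgp]
          simp [Int.ofNat_eq_natCast]
        · rw [PySem.Dict.get?_insert_of_ne _ _ hgg, hseen g']
          by_cases hg'p : g' ∈ p
          · rw [PySem.List.index?_append_of_mem [g] hg'p]
          · have h1 : PySem.List.index? p g' = none := (PySem.List.index?_eq_none_iff _ _).mpr hg'p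
            have h2 : PySem.List.index? (p ++ [g]) g' = none := by
              rw [PySem.List.index?_eq_none_iff]
              simp only [List.mem_append, List.mem_singleton]
              rintro (hc | rfl)
              · exact hg'p hc
              · exact hgg rfl
            rw [h1, h2]
      · intro g'
        rw [PySem.Set.mem_add]
        simp only [List.mem_append, List.mem_singleton, hs g']
      · exact pvNoSplit_append hns (Or.inl hgp)
    | some fn =>
      -- g seen before at first index fn
      obtain ⟨hfn, hval⟩ := pvIndex?_facts hidx
      have hgp : g ∈ p := hval ▸ pvGetD_mem hfn
      have hcont : PySem.Set.contains s g = true :=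
        (PySem.Set.contains_iff _ _).mpr ((hs g).mpr hgp)
      have hpne : p ≠ [] := by rintro rfl; simp at hgp
      have hl1 : p.length - 1 < p.length := by
        cases p
        · exact absurd rfl hpne
        · simp
      have hlast : p.getLast? = some (p.getD (p.length - 1) 0) := by
        rw [List.getLast?_eq_getElem?, List.getElem?_eq_getElem hl1,
          List.getD_eq_getElem p 0 hl1]
      simp only [Option.map_some, hlast]
      by_cases hprev : p.getD (p.length - 1) 0 = g
      · -- previous element is g: run continues, A's back-scan finds nothing
        have hany : ((PySem.List.pyRange ((Int.ofNat fn) + 1) (p.length : Int) 1).any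
            (fun j => PySem.List.pyGet? (p ++ g :: rest) j != some g)) = false := by
          rw [Bool.eq_false_iff]
          intro hany
          obtain ⟨j, hjmem, hjval⟩ := List.any_eq_true.mp hany
          rw [PySem.List.mem_pyRange_one] at hjmem
          rw [Int.ofNat_eq_natCast] at hjmem
          have hj0 : 0 ≤ j := by omega
          have hjlt : j.toNat < p.length := by omega
          have hget : PySem.List.pyGet? (p ++ g :: rest) j = some ((p ++ g :: rest).getD j.toNat 0) := by
            rw [PySem.List.pyGet?_of_nonneg _ hj0]
            rw [List.getElem?_eq_getElem (by simp; omega), List.getD_eq_getElem _ 0 (by simp; omega)]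
          have heq : p.getD j.toNat 0 = g := by
            have := hns fn j.toNat (p.length - 1) (by omega) (by omega) hl1
              (by rw [hval, hprev])
            rw [hprev] at this
            exact this
          rw [hget, pvGetD_append_left hjlt, heq] at hjval
          simp at hjval
        have hcond : ((some (p.getD (p.length - 1) 0) : Option Int).isNone
            || (some g != some (p.getD (p.length - 1) 0))) = false := by
          rw [hprev]; simp
        rw [hany, hcond]
        simp only [if_false, Bool.false_eq_true]
        have hrw : p ++ g :: rest = (p ++ [g]) ++ rest := by simp
        have hlen : (p.length : Int) + 1 = ((p ++ [g]).length : Int) := by simp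
        rw [hrw, hlen, ih (p ++ [g]) seen s ?_ ?_ ?_, List.getLast?_concat, hprev]
        · intro g'
          rw [hseen g', pvIndex?_append_singleton_of_mem hgp g']
        · intro g'
          rw [hs g']
          constructor
          · exact List.mem_append_left _
          · intro h
            rcases List.mem_append.mp h with h | h
            · exact h
            · rw [List.mem_singleton] at h
              exact h ▸ hgp
        · exact pvNoSplit_append hns (Or.inr hprev)
      · -- previous element differs from g: both sides return true
        have hany : ((PySem.List.pyRange ((Int.ofNat fn) + 1) (p.length : Int) 1).any
            (fun j => PySem.List.pyGet? (p ++ g :: rest) j != some g)) = true := by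
          rw [List.any_eq_true]
          refine ⟨((p.length - 1 : Nat) : Int), ?_, ?_⟩
          · rw [PySem.List.mem_pyRange_one, Int.ofNat_eq_natCast]
            have hfnne : fn ≠ p.length - 1 := fun h => hprev (h ▸ hval)
            omega
          · rw [PySem.List.pyGet?_of_nonneg _ (by positivity), Int.toNat_natCast]
            rw [List.getElem?_eq_getElem (by simp; omega)]
            have : (p ++ g :: rest)[p.length - 1]'(by simp; omega) = p.getD (p.length - 1) 0 := by
              rw [List.getD_eq_getElem p 0 hl1]
              exact List.getElem_append_left hl1
            rw [this]
            simp only [bne_iff_ne, ne_eq, Option.some.injEq]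
            exact hprev
        have hcond : ((some (p.getD (p.length - 1) 0) : Option Int).isNone
            || (some g != some (p.getD (p.length - 1) 0))) = true := by
          simp
          exact fun h => hprev h.symm
        rw [hany, hcond, hcont]
        simp

-- ===== VERDICT (by name: the statement is the Claim_ definition above) =====
theorem has_non_consecutive_turn_spec : Claim_equal_has_non_consecutive_turn := by
  intro groups sequence _
  unfold Spec_has_non_consecutive_turn has_non_consecutive_turn has_non_consecutive_turn_alt
  rw [pvLoopB_eq_runScan, ← pvGroupSeq_eq_filterMap]
  have := pvLoopA_eq_runScan (pvGroupSeq (pvItemToGroup groups) sequence) []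
    PySem.Dict.empty PySem.Set.empty
    (by intro g; rfl) (by intro g; simp [PySem.Set.empty]) pvNoSplit_nil
  simpa using this
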